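-- pv_equiv track=rewrite | github.com/SamForbush/NLP-Final-2022 | hafez/build_fsa.py | build_fsa
-- ===== SOURCE A (Python) =====
-- def build_fsa(pattern, vocab, stress_to_words):
--     transitions = []
--     for idx, syll in enumerate(pattern):
--         for stress, words in stress_to_words.items():
--             if stress == pattern[idx : idx + len(stress)]:
--                 # add transitions
--                 for word in words:
--                     transitions.append((word, idx, idx + len(stress)))
--     return transitions
-- ===== SOURCE B (Python) =====
-- def build_fsa(pattern, vocab, stress_to_words):
--     # Hash-indexed matcher: instead of scanning every stress key at every
--     # position, look up the pattern slice for each distinct key length in a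
--     # dict, then order the (at most one per length) hits by dict rank.
--     entry_of = {}
--     for rank, (stress, words) in enumerate(stress_to_words.items()):
--         entry_of[stress] = (rank, words)
--     lengths = sorted({len(s) for s in stress_to_words})
--     n = len(pattern)
--     transitions = []
--     for i in range(n):
--         hits = []
--         for L in lengths:
--             if i + L <= n:
--                 e = entry_of.get(pattern[i:i + L])
--                 if e is not None:
--                     hits.append((e[0], i, i + L, e[1]))
--         hits.sort(key=lambda h: h[0])
--         for _, a, b, words in hits:
--             transitions.extend((w, a, b) for w in words)
--     return transitions
-- ===== Notes on version B (the rewrite author's own statement) =====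
-- stated objective: faster
-- what changed: Replaced A's scan of every stress key at every pattern position with a hash index: a dict stress->(rank, words) plus the sorted distinct key lengths, so each position does one dict lookup of the pattern slice per distinct length and the (at most one per length) hits are reordered by dict rank.
import Mathlib
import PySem

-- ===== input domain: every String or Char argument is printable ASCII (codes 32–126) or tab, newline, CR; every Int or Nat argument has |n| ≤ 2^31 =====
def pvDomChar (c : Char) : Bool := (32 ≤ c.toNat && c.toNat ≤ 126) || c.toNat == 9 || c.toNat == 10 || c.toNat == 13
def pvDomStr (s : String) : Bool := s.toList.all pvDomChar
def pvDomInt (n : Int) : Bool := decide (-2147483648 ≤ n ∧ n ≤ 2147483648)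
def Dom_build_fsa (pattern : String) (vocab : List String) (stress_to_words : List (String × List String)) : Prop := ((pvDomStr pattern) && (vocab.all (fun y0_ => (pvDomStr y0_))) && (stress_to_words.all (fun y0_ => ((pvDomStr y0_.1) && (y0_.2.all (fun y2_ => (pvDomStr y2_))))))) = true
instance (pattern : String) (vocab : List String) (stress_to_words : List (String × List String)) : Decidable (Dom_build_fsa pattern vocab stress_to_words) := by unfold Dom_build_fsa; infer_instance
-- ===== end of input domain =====

-- B replaces A's scan of every stress key at every position by a hash index:
-- one dict lookup of the pattern slice per distinct key length at each position,
-- the (at most one per length) hits reordered by dict rank.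

-- ===== PORT A =====
-- Port of A: for each position idx in the pattern, scan every (stress, words)
-- dict entry in order and append a transition per word when stress matches there.
def build_fsa (pattern : String) (vocab : List String) (stress_to_words : List (String × List String)) : List (String × Int × Int) :=
  (PySem.List.enumerate pattern.toList).foldl (fun transitions p =>
    stress_to_words.foldl (fun transitions sw =>
      if sw.1.toList = PySem.List.slice pattern.toList (some p.1) (some (p.1 + PySem.Str.len sw.1)) then
        sw.2.foldl (fun transitions w => transitions ++ [(w, p.1, p.1 + PySem.Str.len sw.1)]) transitions
      else transitions) transitions) []

-- ===== PORT B =====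
-- Port of B (hash-indexed matcher): build a dict stress → (rank, words) and the
-- sorted list of distinct key lengths; at each position look up the pattern slice
-- of each length that fits, sort the hits by rank, and emit their transitions.
def build_fsa_alt (pattern : String) (vocab : List String) (stress_to_words : List (String × List String)) : List (String × Int × Int) :=
  let entry_of : PySem.Dict (List Char) (Int × List String) :=
    (PySem.List.enumerate stress_to_words).foldl
      (fun d p => d.insert p.2.1.toList (p.1, p.2.2)) PySem.Dict.empty
  let lengths : List Int :=
    PySem.List.sorted (PySem.Set.ofList (stress_to_words.map (fun e => PySem.Str.len e.1))) (fun x => x)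
  let n := PySem.Str.len pattern
  (PySem.List.pyRange 0 n).foldl (fun transitions i =>
    let hits : List (Int × Int × Int × List String) :=
      lengths.foldl (fun hits L =>
        if i + L ≤ n then
          match entry_of.get? (PySem.List.slice pattern.toList (some i) (some (i + L))) with
          | some e => hits ++ [(e.1, i, i + L, e.2)]
          | none => hits
        else hits) []
    (PySem.List.sorted hits (fun h => h.1)).foldl
      (fun tr h => tr ++ h.2.2.2.map (fun w => (w, h.2.1, h.2.2.1))) transitions) []

-- ===== PRECONDITION & SPEC =====
-- Pre_ requires the association list's keys to be pairwise distinct: the Python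
-- argument is a dict, whose keys are distinct by construction, so no Python input
-- is excluded; on duplicate-key lists B's dict index would collapse the duplicates.
def Pre_build_fsa (pattern : String) (vocab : List String) (stress_to_words : List (String × List String)) : Prop :=
  (stress_to_words.map Prod.fst).Nodup
instance (pattern : String) (vocab : List String) (stress_to_words : List (String × List String)) : Decidable (Pre_build_fsa pattern vocab stress_to_words) := by unfold Pre_build_fsa; infer_instance
def pvWitness_build_fsa : String × List String × (List (String × List String)) :=
  ("abab", ["x"], [("a", ["w1"]), ("ab", ["w2", "w3"]), ("bab", ["w4"])])
def Spec_build_fsa (pattern : String) (vocab : List String) (stress_to_words : List (String × List String)) (out : List (String × Int × Int)) : Prop := out = build_fsa_alt pattern vocab stress_to_words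
instance (pattern : String) (vocab : List String) (stress_to_words : List (String × List String)) (out : List (String × Int × Int)) : Decidable (Spec_build_fsa pattern vocab stress_to_words out) := by unfold Spec_build_fsa; infer_instance

-- ===== CLAIM (what is proved, stated in full; the proofs are below) =====
def Claim_equal_build_fsa : Prop := ∀ (pattern : String) (vocab : List String) (stress_to_words : List (String × List String)), Dom_build_fsa pattern vocab stress_to_words → Pre_build_fsa pattern vocab stress_to_words → Spec_build_fsa pattern vocab stress_to_words (build_fsa pattern vocab stress_to_words)

-- ===== LEMMAS AND PROOFS =====

def pvG (pat : List Char) (j : Nat) (p : Int × String × List String) : List (Int × Int × Int × List String) :=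
  if p.2.1.toList = PySem.List.slice pat (some (j : Int)) (some ((j : Int) + (p.2.1.toList.length : Int))) then
    [(p.1, (j : Int), (j : Int) + (p.2.1.toList.length : Int), p.2.2)]
  else []

def pvTarget (pat : List Char) (sw : List (String × List String)) (j : Nat) : List (Int × Int × Int × List String) :=
  (PySem.List.enumerate sw).flatMap (pvG pat j)

def pvF (pat : List Char) (sw : List (String × List String)) (j : Nat) : List (String × Int × Int) :=
  (pvTarget pat sw j).flatMap (fun h => h.2.2.2.map (fun w => (w, h.2.1, h.2.2.1)))

theorem pvA_inner (pat : List Char) (sw : List (String × List String)) (i : Int) (acc : List (String × Int × Int)) :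
    sw.foldl (fun transitions e =>
      if e.1.toList = PySem.List.slice pat (some i) (some (i + PySem.Str.len e.1)) then
        e.2.foldl (fun transitions w => transitions ++ [(w, i, i + PySem.Str.len e.1)]) transitions
      else transitions) acc
    = acc ++ sw.flatMap (fun e =>
        if e.1.toList = PySem.List.slice pat (some i) (some (i + PySem.Str.len e.1)) then
          e.2.map (fun w => (w, i, i + PySem.Str.len e.1))
        else []) := by
  induction sw generalizing acc with
  | nil => simp
  | cons e rest ih =>
    rw [List.foldl_cons, List.flatMap_cons]
    by_cases h : e.1.toList = PySem.List.slice pat (some i) (some (i + PySem.Str.len e.1))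
    · rw [if_pos h, if_pos h, PySem.List.foldl_append_singleton_eq_map, ih, List.append_assoc]
    · rw [if_neg h, if_neg h, ih, List.nil_append]

theorem pvFlatMap_enumerate_fst {α β : Type} (xs : List α) (h : Int → List β) :
    (PySem.List.enumerate xs).flatMap (fun p => h p.1)
      = List.flatMap (fun j : Nat => h (j : Int)) (List.range xs.length) := by
  have h1 : (PySem.List.enumerate xs).flatMap (fun p => h p.1)
      = ((PySem.List.enumerate xs).map (fun p : Int × α => p.1)).flatMap h :=
    (List.flatMap_map (fun p : Int × α => p.1) h _).symm
  rw [h1, PySem.List.map_fst_enumerate, zero_add, PySem.List.pyRange_zero_natCast, List.flatMap_map]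

theorem pvA_pos (pat : List Char) (sw : List (String × List String)) (j : Nat) :
    sw.flatMap (fun e =>
        if e.1.toList = PySem.List.slice pat (some (j:Int)) (some ((j:Int) + PySem.Str.len e.1)) then
          e.2.map (fun w => (w, (j:Int), (j:Int) + PySem.Str.len e.1))
        else []) = pvF pat sw j := by
  unfold pvF pvTarget
  rw [List.flatMap_assoc]
  conv_lhs => rw [show sw = (PySem.List.enumerate sw).map (fun p => p.2) from (PySem.List.map_snd_enumerate sw 0).symm]
  rw [List.flatMap_map]
  apply List.flatMap_congr
  intro p _
  unfold pvG
  simp only [PySem.Str.len_eq]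
  by_cases h : p.2.1.toList = PySem.List.slice pat (some (j:Int)) (some ((j:Int) + (p.2.1.toList.length : Int)))
  · rw [if_pos h, if_pos h]
    simp
  · rw [if_neg h, if_neg h]
    simp

theorem pvA_eq (pattern : String) (vocab : List String) (sw : List (String × List String)) :
    build_fsa pattern vocab sw = (List.range pattern.toList.length).flatMap (pvF pattern.toList sw) := by
  unfold build_fsa
  simp only [pvA_inner]
  rw [PySem.List.foldl_append_eq_flatMap, List.nil_append]
  rw [pvFlatMap_enumerate_fst pattern.toList (fun i => sw.flatMap (fun e =>
        if e.1.toList = PySem.List.slice pattern.toList (some i) (some (i + PySem.Str.len e.1)) then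
          e.2.map (fun w => (w, i, i + PySem.Str.len e.1))
        else []))]
  apply List.flatMap_congr
  intro j _
  exact pvA_pos pattern.toList sw j

def pvDict (sw : List (String × List String)) : PySem.Dict (List Char) (Int × List String) :=
  (PySem.List.enumerate sw).foldl (fun d p => d.insert p.2.1.toList (p.1, p.2.2)) PySem.Dict.empty

def pvLengths (sw : List (String × List String)) : List Int :=
  PySem.List.sorted (PySem.Set.ofList (sw.map (fun e => ((e.1.toList.length : Nat) : Int)))) (fun x => x)

def pvHitAt (pat : List Char) (sw : List (String × List String)) (j : Nat) (L : Int) : List (Int × Int × Int × List String) :=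
  if (j : Int) + L ≤ (pat.length : Int) then
    match (pvDict sw).get? (PySem.List.slice pat (some (j : Int)) (some ((j : Int) + L))) with
    | some e => [(e.1, (j : Int), (j : Int) + L, e.2)]
    | none => []
  else []

theorem pvDict_items (sw : List (String × List String)) (hk : (sw.map Prod.fst).Nodup) :
    (pvDict sw).items = (PySem.List.enumerate sw).map (fun p => (p.2.1.toList, (p.1, p.2.2))) := by
  unfold pvDict
  have hmap : ((PySem.List.enumerate sw).map (fun p : Int × String × List String => p.2.1.toList)).Nodup := by
    have : (PySem.List.enumerate sw).map (fun p : Int × String × List String => p.2.1.toList)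
        = ((PySem.List.enumerate sw).map (fun p : Int × String × List String => p.2)).map (fun e => e.1.toList) := by
      rw [List.map_map]; rfl
    rw [this, PySem.List.map_snd_enumerate]
    have : sw.map (fun e => e.1.toList) = (sw.map Prod.fst).map String.toList := by
      rw [List.map_map]; rfl
    rw [this]
    exact hk.map (fun a b h => String.toList_inj.mp h)
  rw [PySem.Dict.items_foldl_insert_fresh (PySem.List.enumerate sw)
        (fun p => p.2.1.toList) (fun p => (p.1, p.2.2)) PySem.Dict.empty
        (fun a _ => PySem.Dict.contains_empty _) hmap]
  simp [PySem.Dict.empty]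

theorem pvDict_keys_nodup (sw : List (String × List String)) :
    (pvDict sw).keys.Nodup := by
  unfold pvDict
  exact PySem.Dict.nodup_keys_foldl_insert_key _ _ _ _ PySem.Dict.nodup_keys_empty

theorem pvPairwise_flatMap {α β : Type} (l : List α) (g : α → List β) (f : α → Int) (k : β → Int)
    (hl : l.Pairwise (fun a b => f a < f b))
    (hg : ∀ a, ∀ x ∈ g a, k x = f a)
    (h1 : ∀ a, (g a).length ≤ 1) :
    (l.flatMap g).Pairwise (fun x y => k x < k y) := by
  induction l with
  | nil => simp
  | cons a t ih =>
    rw [List.flatMap_cons]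
    rcases List.pairwise_cons.mp hl with ⟨ha, ht⟩
    rw [List.pairwise_append]
    refine ⟨?_, ih ht, ?_⟩
    · match hga : g a with
      | [] => simp
      | [x] => simp
      | x :: y :: r => have := h1 a; rw [hga] at this; simp at this
    · intro x hx y hy
      rw [List.mem_flatMap] at hy
      obtain ⟨b, hb, hyb⟩ := hy
      rw [hg a x hx, hg b y hyb]
      exact ha b hb

theorem pvNodup_of_pairwise_key {β : Type} (k : β → Int) (l : List β)
    (h : l.Pairwise (fun x y => k x < k y)) : l.Nodup :=
  h.imp (fun hlt he => by subst he; exact lt_irrefl _ hlt)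

theorem pvTarget_pairwise (pat : List Char) (sw : List (String × List String)) (j : Nat) :
    (pvTarget pat sw j).Pairwise (fun x y => x.1 < y.1) := by
  unfold pvTarget
  apply pvPairwise_flatMap _ _ (fun p => p.1) _ (PySem.List.pairwise_lt_enumerate sw 0)
  · intro p x hx
    unfold pvG at hx
    split at hx
    · simp at hx; rw [hx]
    · simp at hx
  · intro p
    unfold pvG
    split <;> simp

theorem pvHits_pairwise (pat : List Char) (sw : List (String × List String)) (j : Nat) :
    ((pvLengths sw).flatMap (pvHitAt pat sw j)).Pairwise (fun x y => x.2.2.1 < y.2.2.1) := by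
  apply pvPairwise_flatMap _ _ (fun L => (j : Int) + L)
  · exact (PySem.List.sorted_ofList_pairwise_lt _).imp (fun h => by omega)
  · intro L x hx
    unfold pvHitAt at hx
    split at hx
    · split at hx
      · simp at hx; rw [hx]
      · simp at hx
    · simp at hx
  · intro L
    unfold pvHitAt
    split
    · split <;> simp
    · simp

theorem pvMem_iff (pat : List Char) (sw : List (String × List String)) (j : Nat)
    (hk : (sw.map Prod.fst).Nodup) (hj : j ≤ pat.length) (x : Int × Int × Int × List String) :
    x ∈ (pvLengths sw).flatMap (pvHitAt pat sw j) ↔ x ∈ pvTarget pat sw j := by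
  rw [List.mem_flatMap]
  unfold pvTarget
  rw [List.mem_flatMap]
  constructor
  · rintro ⟨L, hL, hx⟩
    -- L is the length of some key, hence 0 ≤ L
    have hL0 : 0 ≤ L := by
      unfold pvLengths at hL
      rw [PySem.List.mem_sorted, PySem.Set.mem_ofList, List.mem_map] at hL
      obtain ⟨e0, _, he0⟩ := hL
      rw [← he0]
      positivity
    obtain ⟨Ln, rfl⟩ : ∃ Ln : Nat, L = (Ln : Int) := ⟨L.toNat, (Int.toNat_of_nonneg hL0).symm⟩
    unfold pvHitAt at hx
    split at hx
    case isFalse => simp at hx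
    case isTrue hguard =>
      rw [PySem.List.slice_natCast_add] at hx
      split at hx
      case h_2 => simp at hx
      case h_1 e hget =>
        simp only [List.mem_singleton] at hx
        have hmem := PySem.Dict.mem_items_of_get?_eq_some _ hget
        rw [pvDict_items sw hk, List.mem_map] at hmem
        obtain ⟨p, hp, hpe⟩ := hmem
        have hkey : p.2.1.toList = (pat.drop j).take Ln := congrArg Prod.fst hpe
        have he : (p.1, p.2.2) = e := congrArg Prod.snd hpe
        have hfit : j + Ln ≤ pat.length := by exact_mod_cast hguard
        have hlen : p.2.1.toList.length = Ln := by
          rw [hkey, List.length_take, List.length_drop]; omega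
        refine ⟨p, hp, ?_⟩
        unfold pvG
        rw [hlen, PySem.List.slice_natCast_add, if_pos hkey]
        simp only [List.mem_singleton]
        rw [hx, ← he]
  · rintro ⟨p, hp, hx⟩
    unfold pvG at hx
    split at hx
    case isFalse => simp at hx
    case isTrue hcond =>
      simp only [List.mem_singleton] at hx
      rw [PySem.List.slice_natCast_add] at hcond
      have hfit : j + p.2.1.toList.length ≤ pat.length := by
        have hmin := congrArg List.length hcond
        rw [List.length_take, List.length_drop] at hmin
        have h2 : p.2.1.toList.length ≤ pat.length - j :=
          le_trans (le_of_eq hmin) (min_le_right _ _)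
        omega
      refine ⟨(p.2.1.toList.length : Int), ?_, ?_⟩
      · unfold pvLengths
        rw [PySem.List.mem_sorted, PySem.Set.mem_ofList, List.mem_map]
        refine ⟨p.2, ?_, ?_⟩
        · rw [PySem.List.mem_enumerate_iff] at hp
          obtain ⟨k, hklt, hpk⟩ := hp
          rw [hpk]
          exact List.getElem_mem hklt
        · rfl
      · unfold pvHitAt
        rw [if_pos (by exact_mod_cast hfit)]
        rw [PySem.List.slice_natCast_add]
        rw [show (pvDict sw).get? ((pat.drop j).take p.2.1.toList.length) = some (p.1, p.2.2) from ?_]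
        · simp only [List.mem_singleton]
          exact hx
        · rw [PySem.Dict.get?_eq_some_iff_mem_items _ _ _ (pvDict_keys_nodup sw), pvDict_items sw hk,
              List.mem_map]
          exact ⟨p, hp, by rw [← hcond]⟩

theorem pvHits_eq (pat : List Char) (sw : List (String × List String)) (j : Nat)
    (hk : (sw.map Prod.fst).Nodup) (hj : j ≤ pat.length) :
    PySem.List.sorted ((pvLengths sw).flatMap (pvHitAt pat sw j)) (fun h => h.1)
      = pvTarget pat sw j := by
  apply PySem.List.sorted_eq_of_perm_of_pairwise_lt
  · rw [List.perm_ext_iff_of_nodup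
      (pvNodup_of_pairwise_key _ _ (pvTarget_pairwise pat sw j))
      (pvNodup_of_pairwise_key _ _ (pvHits_pairwise pat sw j))]
    intro a
    exact (pvMem_iff pat sw j hk hj a).symm
  · exact pvTarget_pairwise pat sw j

theorem pvHitAt_body (pat : List Char) (sw : List (String × List String)) (j : Nat)
    (acc : List (Int × Int × Int × List String)) (L : Int) :
    (if (j : Int) + L ≤ (pat.length : Int) then
        match (pvDict sw).get? (PySem.List.slice pat (some (j : Int)) (some ((j : Int) + L))) with
        | some e => acc ++ [(e.1, (j : Int), (j : Int) + L, e.2)]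
        | none => acc
      else acc) = acc ++ pvHitAt pat sw j L := by
  unfold pvHitAt
  split
  · cases (pvDict sw).get? (PySem.List.slice pat (some (j : Int)) (some ((j : Int) + L))) <;> simp
  · simp

theorem pvPerPos (pattern : String) (sw : List (String × List String)) (j : Nat)
    (hk : (sw.map Prod.fst).Nodup) (hj : j ≤ pattern.toList.length) :
    List.flatMap (fun x => List.map (fun w => (w, x.2.1, x.2.2.1)) x.2.2.2)
      (PySem.List.sorted
        (List.foldl (fun hits L =>
            if (j : Int) + L ≤ ((pattern.toList.length : Nat) : Int) then
              match (pvDict sw).get? (PySem.List.slice pattern.toList (some (j : Int)) (some ((j : Int) + L))) with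
              | some e => hits ++ [(e.1, (j : Int), (j : Int) + L, e.2)]
              | none => hits
            else hits)
          [] (pvLengths sw))
        (fun h => h.1))
      = pvF pattern.toList sw j := by
  have hfold := PySem.List.foldl_congr_mem (pvLengths sw) _
      (fun acc L => acc ++ pvHitAt pattern.toList sw j L) ([] : List (Int × Int × Int × List String))
      (fun acc L _ => pvHitAt_body pattern.toList sw j acc L)
  rw [hfold, PySem.List.foldl_append_eq_flatMap, List.nil_append,
    pvHits_eq pattern.toList sw j hk hj]
  rfl

theorem pvB_eq (pattern : String) (vocab : List String) (sw : List (String × List String))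
    (hk : (sw.map Prod.fst).Nodup) :
    build_fsa_alt pattern vocab sw = (List.range pattern.toList.length).flatMap (pvF pattern.toList sw) := by
  unfold build_fsa_alt
  simp only [PySem.List.foldl_append_eq_flatMap, PySem.Str.len_eq]
  rw [show (List.foldl (fun (d : PySem.Dict (List Char) (Int × List String)) (p : Int × String × List String) => d.insert p.2.1.toList (p.1, p.2.2)) PySem.Dict.empty (PySem.List.enumerate sw)) = pvDict sw from rfl]
  rw [show PySem.List.sorted (PySem.Set.ofList (sw.map (fun e => ((e.1.toList.length : Nat) : Int)))) (fun x => x) = pvLengths sw from rfl]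
  rw [PySem.List.pyRange_zero_natCast, List.flatMap_map, List.nil_append]
  apply List.flatMap_congr
  intro j hj
  exact pvPerPos pattern sw j hk (le_of_lt (List.mem_range.mp hj))

-- ===== VERDICT (by name: the statement is the Claim_ definition above) =====
theorem build_fsa_spec : Claim_equal_build_fsa := by
  intro pattern vocab sw _ hk
  show build_fsa pattern vocab sw = build_fsa_alt pattern vocab sw
  rw [pvA_eq pattern vocab sw, pvB_eq pattern vocab sw hk]
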